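-- pv_equiv track=rewrite | github.com/APD007/WOC-PROJECT | ciphers/homophonic.py | decrypt_homophonic
-- ===== SOURCE A (Python) =====
-- def decrypt_homophonic(ciphertext, homophonic_key):
--     reverse_mapping = {number: letter for letter, numbers in homophonic_key.items() for number in numbers}
--
--     plaintext = ""
--     i = 0
--     while i < len(ciphertext):
--         segment = ""
--         found = False
--         while i < len(ciphertext) and ciphertext[i].isalnum():
--             segment += ciphertext[i]
--             i += 1
--             if segment in reverse_mapping:
--                 plaintext += reverse_mapping[segment]
--                 found = True
--                 break
--         if not found:
--             plaintext += segment
--             i += 1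
--     return plaintext
-- ===== SOURCE B (Python) =====
-- def decrypt_homophonic(ciphertext, homophonic_key):
--     # Build a trie (nested dicts) of the code strings; "" marks a terminal node
--     # and holds the plaintext letter (later keys overwrite, like the dict build in A).
--     root = {}
--     for letter, numbers in homophonic_key.items():
--         for number in numbers:
--             node = root
--             for ch in number:
--                 node = node.setdefault(ch, {})
--             node[""] = letter
--     out = []
--     i = 0
--     n = len(ciphertext)
--     while i < n:
--         if not ciphertext[i].isalnum():
--             i += 1
--             continue
--         start = i
--         node = root
--         matched = False
--         while i < n and ciphertext[i].isalnum():
--             node = node.get(ciphertext[i])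
--             i += 1
--             if node is None:
--                 # fell off the trie: no code starts with this prefix, so the
--                 # rest of this alphanumeric run can never match either
--                 while i < n and ciphertext[i].isalnum():
--                     i += 1
--                 break
--             if "" in node:
--                 out.append(node[""])
--                 matched = True
--                 break
--         if matched:
--             continue
--         out.append(ciphertext[start:i])
--         i += 1  # skip the delimiter, as A does
--     return "".join(out)
-- ===== Notes on version B (the rewrite author's own statement) =====
-- stated objective: faster
-- what changed: Replaces A's repeated segment-string building and dict membership tests with a character trie built once from the reverse map; the scan descends the trie char by char and abandons an alphanumeric run as soon as the prefix falls off the trie instead of rebuilding and hashing ever longer segment strings.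
import Mathlib
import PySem

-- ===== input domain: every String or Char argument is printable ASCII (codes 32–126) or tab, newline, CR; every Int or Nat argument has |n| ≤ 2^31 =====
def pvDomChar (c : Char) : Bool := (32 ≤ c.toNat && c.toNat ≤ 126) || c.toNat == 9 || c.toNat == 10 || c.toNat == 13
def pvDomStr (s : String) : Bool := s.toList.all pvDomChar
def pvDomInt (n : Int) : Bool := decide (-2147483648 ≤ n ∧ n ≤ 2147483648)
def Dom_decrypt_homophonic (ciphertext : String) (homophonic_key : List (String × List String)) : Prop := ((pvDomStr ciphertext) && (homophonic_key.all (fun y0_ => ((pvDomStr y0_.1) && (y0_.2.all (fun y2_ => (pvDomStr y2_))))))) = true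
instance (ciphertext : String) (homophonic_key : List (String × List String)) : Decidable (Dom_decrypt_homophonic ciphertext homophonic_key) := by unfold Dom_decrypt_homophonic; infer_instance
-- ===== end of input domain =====

-- B replaces A's per-step segment rebuilding + dict membership by a character trie built
-- once from the reverse map, abandoning an alphanumeric run as soon as its prefix falls off
-- the trie (objective: faster).

-- Shared calling-convention helper: the Python parameter is a dict, so duplicate letters in
-- the association list collapse (last value wins, first position kept) before either
-- function runs; this models that dict construction. (Char.isAlnum of Python is
-- PySem.Chars.isalnum, exact on the ASCII domain.)
def pvDictItems (key : List (String × List String)) : List (String × List String) :=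
  (key.foldl (fun d (p : String × List String) => d.insert p.1 p.2) PySem.Dict.empty).items

-- ===== PORT A =====
-- reverse_mapping = {number: letter for letter, numbers in ….items() for number in numbers}
def pvBuildRm (items : List (String × List String)) : PySem.Dict (List Char) (List Char) :=
  items.foldl (fun d p => p.2.foldl (fun d n => d.insert n.toList p.1.toList) d) PySem.Dict.empty

-- inner while loop: returns (segment, remaining chars, found letter?)
def pvAInner (rm : PySem.Dict (List Char) (List Char)) :
    List Char → List Char → (List Char × List Char × Option (List Char))
  | [], seg => (seg, [], none)
  | c :: rest, seg =>
    if PySem.Chars.isalnum c then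
      match rm.get? (seg ++ [c]) with
      | some l => (seg ++ [c], rest, some l)
      | none => pvAInner rm rest (seg ++ [c])
    else (seg, c :: rest, none)

-- outer while loop (fuel ≥ length makes the variable-step index loop total; A never needs more)
def pvALoopF (rm : PySem.Dict (List Char) (List Char)) : Nat → List Char → List Char
  | 0, _ => []
  | _ + 1, [] => []
  | fuel + 1, c :: rest =>
    match pvAInner rm (c :: rest) [] with
    | (_, rest', some l) => l ++ pvALoopF rm fuel rest'
    | (seg, rest', none) => seg ++ pvALoopF rm fuel rest'.tail

def decrypt_homophonic (ciphertext : String) (homophonic_key : List (String × List String)) : String :=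
  let rm := pvBuildRm (pvDictItems homophonic_key)
  String.mk (pvALoopF rm ciphertext.toList.length ciphertext.toList)

-- ===== PORT B =====
mutual
inductive PvTrie where
  | mk : Option (List Char) → PvChildren → PvTrie
inductive PvChildren where
  | nil : PvChildren
  | cons : Char → PvTrie → PvChildren → PvChildren
end

def PvTrie.term : PvTrie → Option (List Char)
  | .mk t _ => t
def PvTrie.ch : PvTrie → PvChildren
  | .mk _ c => c

def pvChildGet : PvChildren → Char → Option PvTrie
  | .nil, _ => none
  | .cons a t r, c => if a = c then some t else pvChildGet r c

-- node.setdefault-style update: replace the child at c, or append a fresh one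
def pvChildSet : PvChildren → Char → PvTrie → PvChildren
  | .nil, c, nd => .cons c nd .nil
  | .cons a t r, c, nd => if a = c then .cons a nd r else .cons a t (pvChildSet r c nd)

def pvEmptyTrie : PvTrie := .mk none .nil

-- walk/create the path for one code word, then set the terminal letter (overwrite)
def pvInsert : List Char → List Char → PvTrie → PvTrie
  | [], v, .mk _ chs => .mk (some v) chs
  | c :: k, v, .mk tm chs =>
      .mk tm (pvChildSet chs c (pvInsert k v ((pvChildGet chs c).getD pvEmptyTrie)))

def pvBuildTrie (items : List (String × List String)) : PvTrie :=
  items.foldl (fun t p => p.2.foldl (fun t n => pvInsert n.toList p.1.toList t) t) pvEmptyTrie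

-- the inner `while … isalnum(): i += 1` run-consumer (returns consumed run, remainder)
def pvSpan : List Char → (List Char × List Char)
  | [] => ([], [])
  | c :: rest =>
    if PySem.Chars.isalnum c then
      let p := pvSpan rest
      (c :: p.1, p.2)
    else ([], c :: rest)

-- trie descent over one run: (matched letter?, consumed literal, remaining chars)
def pvBDescend : PvTrie → List Char → List Char → (Option (List Char) × List Char × List Char)
  | _, acc, [] => (none, acc, [])
  | node, acc, c :: rest =>
    if PySem.Chars.isalnum c then
      match pvChildGet node.ch c with
      | none =>
        let p := pvSpan rest
        (none, acc ++ c :: p.1, p.2)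
      | some nd =>
        match nd.term with
        | some l => (some l, acc ++ [c], rest)
        | none => pvBDescend nd (acc ++ [c]) rest
    else (none, acc, c :: rest)

-- the outer scan, collecting output pieces (fuel ≥ length, as for A)
def pvBScanF (root : PvTrie) : Nat → List Char → List (List Char)
  | 0, _ => []
  | _ + 1, [] => []
  | fuel + 1, c :: rest =>
    if ¬ PySem.Chars.isalnum c then pvBScanF root (fuel + 1 - 1) rest
    else
      match pvBDescend root [] (c :: rest) with
      | (some l, _, rest') => l :: pvBScanF root fuel rest'
      | (none, lit, rest') => lit :: pvBScanF root fuel rest'.tail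

def decrypt_homophonic_alt (ciphertext : String) (homophonic_key : List (String × List String)) : String :=
  let root := pvBuildTrie (pvDictItems homophonic_key)
  String.mk (PySem.Chars.join [] (pvBScanF root ciphertext.toList.length ciphertext.toList))

-- ===== PRECONDITION & SPEC =====
def Spec_decrypt_homophonic (ciphertext : String) (homophonic_key : List (String × List String)) (out : String) : Prop := out = decrypt_homophonic_alt ciphertext homophonic_key
instance (ciphertext : String) (homophonic_key : List (String × List String)) (out : String) : Decidable (Spec_decrypt_homophonic ciphertext homophonic_key out) := by unfold Spec_decrypt_homophonic; infer_instance

-- ===== CLAIM (what is proved, stated in full; the proofs are below) =====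
def Claim_equal_decrypt_homophonic : Prop := ∀ (ciphertext : String) (homophonic_key : List (String × List String)), Dom_decrypt_homophonic ciphertext homophonic_key → Spec_decrypt_homophonic ciphertext homophonic_key (decrypt_homophonic ciphertext homophonic_key)

-- ===== LEMMAS AND PROOFS =====

-- trie lookup (specification device for the proofs; not used by either port)
def pvFind : PvTrie → List Char → Option PvTrie
  | t, [] => some t
  | t, c :: s =>
    match pvChildGet t.ch c with
    | none => none
    | some nd => pvFind nd s

def pvFindTerm (t : PvTrie) (s : List Char) : Option (List Char) := (pvFind t s).bind PvTrie.term

theorem pvChildGet_set (chs : PvChildren) (c a : Char) (nd : PvTrie) :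
    pvChildGet (pvChildSet chs c nd) a = if a = c then some nd else pvChildGet chs a := by
  cases chs with
  | nil => by_cases h : a = c <;> simp [pvChildSet, pvChildGet, h, Ne.symm]
  | cons b t r =>
    have ih := pvChildGet_set r c a nd
    by_cases hb : b = c
    · subst hb
      by_cases h : a = b <;> simp [pvChildSet, pvChildGet, h, Ne.symm]
    · by_cases h : a = c
      · subst h
        simp [pvChildSet, pvChildGet, hb, ih, Ne.symm hb]
      · by_cases hba : b = a <;> simp [pvChildSet, pvChildGet, hb, h, hba, ih]

theorem pvFindTerm_empty (s : List Char) : pvFindTerm pvEmptyTrie s = none := by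
  cases s with
  | nil => simp [pvFindTerm, pvFind, pvEmptyTrie, PvTrie.term]
  | cons c s => simp [pvFindTerm, pvFind, pvEmptyTrie, PvTrie.ch, pvChildGet]

theorem pvFindTerm_insert (k v : List Char) (t : PvTrie) (s : List Char) :
    pvFindTerm (pvInsert k v t) s = if s = k then some v else pvFindTerm t s := by
  induction k generalizing t s with
  | nil =>
    cases t with
    | mk tm chs =>
      cases s with
      | nil => simp [pvInsert, pvFindTerm, pvFind, PvTrie.term]
      | cons a s' =>
        rw [if_neg (by simp)]
        rfl
  | cons c k' ih =>
    cases t with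
    | mk tm chs =>
      cases s with
      | nil =>
        rw [if_neg (by simp)]
        rfl
      | cons a s' =>
        simp only [pvInsert, pvFindTerm, pvFind, PvTrie.ch, pvChildGet_set]
        by_cases hac : a = c
        · subst hac
          rw [if_pos rfl]
          have h1 := ih ((pvChildGet chs a).getD pvEmptyTrie) s'
          simp only [pvFindTerm] at h1
          rw [h1]
          cases hcg : pvChildGet chs a with
          | none =>
            have he : (pvFind pvEmptyTrie s').bind PvTrie.term = none := by
              have h0 := pvFindTerm_empty s'
              simpa [pvFindTerm] using h0
            by_cases hs : s' = k' <;> simp [hcg, hs, he]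
          | some u =>
            by_cases hs : s' = k' <;> simp [hcg, hs]
        · rw [if_neg hac]
          have hne : (a :: s') ≠ (c :: k') := by simp [hac]
          rw [if_neg hne]

theorem pvFind_append (t : PvTrie) (s u : List Char) :
    pvFind t (s ++ u) = (pvFind t s).bind (fun n => pvFind n u) := by
  induction s generalizing t with
  | nil => simp [pvFind]
  | cons c s' ih =>
    simp only [List.cons_append, pvFind]
    cases pvChildGet t.ch c with
    | none => simp
    | some nd => simp [ih]

theorem pvRel_foldl (pairs : List (List Char × List Char)) (t : PvTrie)
    (d : PySem.Dict (List Char) (List Char)) (h : ∀ s, pvFindTerm t s = d.get? s) :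
    ∀ s, pvFindTerm (pairs.foldl (fun t kv => pvInsert kv.1 kv.2 t) t) s
      = (pairs.foldl (fun d kv => d.insert kv.1 kv.2) d).get? s := by
  induction pairs generalizing t d with
  | nil => exact h
  | cons kv rest ih =>
    simp only [List.foldl_cons]
    apply ih
    intro s
    rw [pvFindTerm_insert, PySem.Dict.get?_insert]
    split_ifs with hs
    · rfl
    · exact h s

theorem pvNested_eq_flat {α : Type} (items : List (String × List String))
    (g : α → List Char → List Char → α) (a : α) :
    items.foldl (fun a p => p.2.foldl (fun a n => g a n.toList p.1.toList) a) a
      = (items.flatMap (fun p => p.2.map (fun n => (n.toList, p.1.toList)))).foldl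
          (fun a kv => g a kv.1 kv.2) a := by
  induction items generalizing a with
  | nil => simp
  | cons p rest ih =>
    simp only [List.foldl_cons, List.flatMap_cons, List.foldl_append, List.foldl_map]
    exact ih _

theorem pvBuild_rel (items : List (String × List String)) (s : List Char) :
    pvFindTerm (pvBuildTrie items) s = (pvBuildRm items).get? s := by
  unfold pvBuildTrie pvBuildRm
  rw [pvNested_eq_flat items (fun t k v => pvInsert k v t) pvEmptyTrie,
      pvNested_eq_flat items (fun d k v => d.insert k v) PySem.Dict.empty]
  apply pvRel_foldl
  intro s
  rw [pvFindTerm_empty, PySem.Dict.get?_empty]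

theorem pvAInner_no (rm : PySem.Dict (List Char) (List Char)) :
    ∀ (cs seg : List Char), (∀ u, rm.get? (seg ++ u) = none) →
      pvAInner rm cs seg = (seg ++ (pvSpan cs).1, (pvSpan cs).2, none) := by
  intro cs
  induction cs with
  | nil => intro seg h; simp [pvAInner, pvSpan]
  | cons c rest ih =>
    intro seg h
    by_cases hc : PySem.Chars.isalnum c = true
    · have hq : rm.get? (seg ++ [c]) = none := h [c]
      simp only [pvAInner, hc, if_true, hq]
      have h2 := ih (seg ++ [c]) (by intro u; rw [List.append_assoc]; exact h (c :: u))
      rw [h2]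
      simp [pvSpan, hc]
    · simp [pvAInner, hc, pvSpan]

theorem pvAInner_len (rm : PySem.Dict (List Char) (List Char)) :
    ∀ (cs seg : List Char),
      (pvAInner rm cs seg).2.1.length ≤ cs.length ∧
      ((pvAInner rm cs seg).2.2.isSome → (pvAInner rm cs seg).2.1.length < cs.length) := by
  intro cs
  induction cs with
  | nil => intro seg; simp [pvAInner]
  | cons c rest ih =>
    intro seg
    by_cases hc : PySem.Chars.isalnum c = true
    · simp only [pvAInner, hc, if_true]
      cases hq : rm.get? (seg ++ [c]) with
      | some l => simp
      | none =>
        have h2 := ih (seg ++ [c])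
        constructor
        · exact le_trans h2.1 (by simp)
        · intro hs; exact lt_of_lt_of_le (h2.2 hs) (by simp)
    · simp [pvAInner, hc]

theorem pvInner_corr (items : List (String × List String)) :
    ∀ (cs seg : List Char) (node : PvTrie),
      pvFind (pvBuildTrie items) seg = some node →
      pvBDescend node seg cs
        = ((pvAInner (pvBuildRm items) cs seg).2.2,
           (pvAInner (pvBuildRm items) cs seg).1,
           (pvAInner (pvBuildRm items) cs seg).2.1) := by
  intro cs
  induction cs with
  | nil => intro seg node _; simp [pvBDescend, pvAInner]
  | cons c rest ih =>
    intro seg node hn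
    by_cases hc : PySem.Chars.isalnum c = true
    · cases hcg : pvChildGet node.ch c with
      | none =>
        have hfind0 : pvFind (pvBuildTrie items) (seg ++ [c]) = none := by
          rw [pvFind_append, hn]
          simp [pvFind, hcg]
        have hnone : ∀ u, (pvBuildRm items).get? ((seg ++ [c]) ++ u) = none := by
          intro u
          rw [← pvBuild_rel]
          unfold pvFindTerm
          rw [pvFind_append, hfind0]
          rfl
        have hq0 : (pvBuildRm items).get? (seg ++ [c]) = none := by
          have := hnone []
          simpa using this
        have ha := pvAInner_no (pvBuildRm items) rest (seg ++ [c]) hnone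
        simp only [pvAInner, pvBDescend, hc, if_true, hcg, hq0, ha]
        simp [List.append_assoc]
      | some nd =>
        have hfind1 : pvFind (pvBuildTrie items) (seg ++ [c]) = some nd := by
          rw [pvFind_append, hn]
          simp [pvFind, hcg]
        have hq1 : (pvBuildRm items).get? (seg ++ [c]) = nd.term := by
          rw [← pvBuild_rel]
          unfold pvFindTerm
          rw [hfind1]
          rfl
        cases ht : nd.term with
        | some l =>
          rw [ht] at hq1
          simp [pvAInner, pvBDescend, hc, hcg, hq1, ht]
        | none =>
          rw [ht] at hq1
          simp only [pvAInner, pvBDescend, hc, if_true, hcg, hq1, ht]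
          exact ih (seg ++ [c]) nd hfind1
    · simp [pvAInner, pvBDescend, hc]

theorem pvJoin_nil : PySem.Chars.join ([] : List Char) [] = [] := by
  simp [PySem.Chars.join, List.intercalate]

theorem pvJoin_cons (x : List Char) (xs : List (List Char)) :
    PySem.Chars.join [] (x :: xs) = x ++ PySem.Chars.join [] xs := by
  cases xs with
  | nil => simp [PySem.Chars.join, List.intercalate]
  | cons y t => simp [PySem.Chars.join, List.intercalate]

theorem pvOuter_corr (items : List (String × List String)) :
    ∀ (f : Nat) (cs : List Char), cs.length ≤ f →
      pvALoopF (pvBuildRm items) f cs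
        = PySem.Chars.join [] (pvBScanF (pvBuildTrie items) f cs) := by
  intro f
  induction f with
  | zero =>
    intro cs hc
    have hz : cs = [] := List.length_eq_zero_iff.mp (Nat.le_zero.mp hc)
    subst hz
    simp [pvALoopF, pvBScanF, pvJoin_nil]
  | succ f ih =>
    intro cs hc
    cases cs with
    | nil => simp [pvALoopF, pvBScanF, pvJoin_nil]
    | cons c rest =>
      by_cases hcn : PySem.Chars.isalnum c = true
      · have hcorr := pvInner_corr items (c :: rest) [] (pvBuildTrie items) rfl
        rcases hr : pvAInner (pvBuildRm items) (c :: rest) [] with ⟨seg', rest', fo⟩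
        rw [hr] at hcorr
        have hlen := pvAInner_len (pvBuildRm items) (c :: rest) []
        rw [hr] at hlen
        cases fo with
        | some l =>
          have hlt : rest'.length < rest.length + 1 := by
            have := hlen.2 (by simp)
            simpa using this
          have hf : rest'.length ≤ f := by
            have hc' : rest.length + 1 ≤ f + 1 := by simpa using hc
            omega
          simp only [pvALoopF, pvBScanF, hr, hcn, Bool.not_eq_true, hcorr, not_true,
            ite_false]
          rw [pvJoin_cons, ih rest' hf]
        | none =>
          have h1 : rest'.length ≤ rest.length + 1 := by simpa using hlen.1
          have h3 : rest'.tail.length = rest'.length - 1 := by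
            cases rest' <;> simp
          have hc' : rest.length + 1 ≤ f + 1 := by simpa using hc
          have h2 : rest'.tail.length ≤ f := by omega
          simp only [pvALoopF, pvBScanF, hr, hcn, Bool.not_eq_true, hcorr, not_true,
            ite_false]
          rw [pvJoin_cons, ih rest'.tail h2]
      · have hA : pvAInner (pvBuildRm items) (c :: rest) [] = ([], c :: rest, none) := by
          simp [pvAInner, hcn]
        simp only [pvALoopF, pvBScanF, hA, hcn, Bool.not_eq_true]
        simp only [List.nil_append, List.tail_cons]
        exact ih rest (by simpa using hc)

-- ===== VERDICT (by name: the statement is the Claim_ definition above) =====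
theorem decrypt_homophonic_spec : Claim_equal_decrypt_homophonic := by
  intro ct key _
  unfold Spec_decrypt_homophonic decrypt_homophonic decrypt_homophonic_alt
  simp only []
  rw [pvOuter_corr (pvDictItems key) ct.toList.length ct.toList le_rfl]
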